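-- pv_equiv track=rewrite | github.com/fisyher/gitadora-customs | plugins/dtx.py | find_last_timesig
-- ===== SOURCE A (Python) =====
-- def find_last_timesig(measure, measure_lengths):
--     last_timesig = None
--
--     for pk in sorted(measure_lengths.keys()):
--         if pk > measure:
--             break
--
--         if pk not in measure_lengths:
--             continue
--
--         last_timesig = measure_lengths[pk]
--
--     return last_timesig
-- ===== SOURCE B (Python) =====
-- def find_last_timesig(measure, measure_lengths):
--     cands = [k for k in measure_lengths.keys() if k <= measure]
--     if not cands:
--         return None
--     return measure_lengths[max(cands)]
-- ===== Notes on version B (the rewrite author's own statement) =====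
-- stated objective: simpler
-- what changed: Replaces A's sort-all-keys-then-scan-keeping-the-last loop with a direct max over the qualifying keys (guarded by an emptiness check), so B neither sorts nor threads a running variable.
import Mathlib
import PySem

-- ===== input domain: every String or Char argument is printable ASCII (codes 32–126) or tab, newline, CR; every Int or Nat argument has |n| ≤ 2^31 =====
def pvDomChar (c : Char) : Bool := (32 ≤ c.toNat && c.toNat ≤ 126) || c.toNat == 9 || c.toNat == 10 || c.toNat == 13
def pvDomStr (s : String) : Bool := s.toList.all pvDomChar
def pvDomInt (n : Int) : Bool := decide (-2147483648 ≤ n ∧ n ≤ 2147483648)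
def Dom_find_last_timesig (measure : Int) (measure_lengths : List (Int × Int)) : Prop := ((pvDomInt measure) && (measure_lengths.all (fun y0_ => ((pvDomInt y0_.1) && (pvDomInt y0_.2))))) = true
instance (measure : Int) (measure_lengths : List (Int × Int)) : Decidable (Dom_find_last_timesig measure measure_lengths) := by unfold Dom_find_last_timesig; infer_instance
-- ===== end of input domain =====

-- One honest line: B returns measure_lengths[max k ≤ measure] guarded by an emptiness
-- check, instead of A's sort-then-scan with a running variable; objective: simpler.

-- ===== PORT A =====
-- the 'for pk in sorted(...): if pk > measure: break; if pk not in ...: continue; last_timesig = ...' loop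
def findA_loop (measure : Int) (d : PySem.Dict Int Int) : List Int → Option Int → Option Int
  | [], acc => acc
  | pk :: rest, acc =>
    if measure < pk then acc
    else if d.contains pk = false then findA_loop measure d rest acc
    else findA_loop measure d rest (d.get? pk)

def find_last_timesig (measure : Int) (measure_lengths : List (Int × Int)) : Option Int :=
  let d := PySem.Dict.ofList measure_lengths
  findA_loop measure d (PySem.List.sorted d.keys (fun x => x) false) none

-- ===== PORT B =====
def find_last_timesig_alt (measure : Int) (measure_lengths : List (Int × Int)) : Option Int :=
  let d := PySem.Dict.ofList measure_lengths
  let cands := d.keys.filter (fun k => decide (k ≤ measure))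
  match PySem.List.max? cands (fun x => x) with
  | none => none
  | some k => d.get? k

-- ===== PRECONDITION & SPEC =====
def Spec_find_last_timesig (measure : Int) (measure_lengths : List (Int × Int)) (out : Option Int) : Prop := out = find_last_timesig_alt measure measure_lengths
instance (measure : Int) (measure_lengths : List (Int × Int)) (out : Option Int) : Decidable (Spec_find_last_timesig measure measure_lengths out) := by unfold Spec_find_last_timesig; infer_instance

-- ===== CLAIM (what is proved, stated in full; the proofs are below) =====
def Claim_equal_find_last_timesig : Prop := ∀ (measure : Int) (measure_lengths : List (Int × Int)), Dom_find_last_timesig measure measure_lengths → Spec_find_last_timesig measure measure_lengths (find_last_timesig measure measure_lengths)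

-- ===== LEMMAS AND PROOFS =====

-- PySem's max? with the identity key is Mathlib's List.max?
theorem pyMax_eq_max? (l : List Int) : PySem.List.max? l (fun x => x) = l.max? := by
  cases l with
  | nil => simp [PySem.List.max?, List.max?]
  | cons x t => rw [PySem.List.max?_id_cons]; rfl

-- List.max? of an Int list is permutation-invariant
theorem max?_perm {l l' : List Int} (h : l.Perm l') : l.max? = l'.max? := by
  cases hl : l.max? with
  | none =>
      rw [List.max?_eq_none_iff] at hl
      subst hl
      rw [eq_comm, List.max?_eq_none_iff]
      exact h.symm.eq_nil
  | some m =>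
      cases hl' : l'.max? with
      | none =>
          rw [List.max?_eq_none_iff] at hl'
          subst hl'
          rw [h.eq_nil] at hl
          simp at hl
      | some m' =>
          have hm := List.max?_eq_some_iff.mp hl
          have hm' := List.max?_eq_some_iff.mp hl'
          have h1 : m ≤ m' := hm'.2 m (h.mem_iff.mp hm.1)
          have h2 : m' ≤ m := hm.2 m' (h.mem_iff.mpr hm'.1)
          exact congrArg some (le_antisymm h1 h2)

-- core invariant: on a strictly increasing key list whose members are in the dict,
-- A's loop computes "acc if no key qualifies, else the value at the largest qualifying key"
theorem findA_loop_eq (measure : Int) (d : PySem.Dict Int Int) :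
    ∀ (L : List Int) (acc : Option Int),
      L.Pairwise (· < ·) → (∀ k ∈ L, d.contains k = true) →
      findA_loop measure d L acc =
        match (L.filter (fun k => decide (k ≤ measure))).max? with
        | none => acc
        | some k => d.get? k := by
  intro L
  induction L with
  | nil => intro acc _ _; simp [findA_loop]
  | cons pk rest ih =>
      intro acc hpair hcont
      rw [List.pairwise_cons] at hpair
      obtain ⟨hlt, hpr⟩ := hpair
      by_cases hgt : measure < pk
      · have hfe : rest.filter (fun k => decide (k ≤ measure)) = [] := by
          rw [List.filter_eq_nil_iff]
          intro k hk
          have := hlt k hk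
          simp only [decide_eq_true_eq]
          omega
        simp [findA_loop, hgt, show ¬ (pk ≤ measure) by omega, hfe]
      · have hle : pk ≤ measure := by omega
        have hcp : d.contains pk = true := hcont pk (List.mem_cons_self)
        have hstep : findA_loop measure d (pk :: rest) acc = findA_loop measure d rest (d.get? pk) := by
          simp [findA_loop, hgt, hcp]
        rw [hstep, ih (d.get? pk) hpr (fun k hk => hcont k (List.mem_cons_of_mem _ hk))]
        rw [List.filter_cons, if_pos (by simpa using hle)]
        cases hfr : rest.filter (fun k => decide (k ≤ measure)) with
        | nil => simp
        | cons y t =>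
            have hy : y ∈ rest := List.mem_of_mem_filter (hfr ▸ List.mem_cons_self)
            have hpy : pk < y := hlt y hy
            show (match (y :: t).max? with | none => d.get? pk | some k => d.get? k) =
                 (match (pk :: y :: t).max? with | none => (none : Option Int) | some k => d.get? k)
            rw [List.max?_cons', List.max?_cons']
            simp only [List.foldl_cons]
            rw [max_comm pk y, max_eq_left (le_of_lt hpy)]

-- ===== VERDICT (by name: the statement is the Claim_ definition above) =====
theorem find_last_timesig_spec : Claim_equal_find_last_timesig := by
  unfold Claim_equal_find_last_timesig
  intro measure ml _
  unfold Spec_find_last_timesig find_last_timesig find_last_timesig_alt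
  set d := PySem.Dict.ofList ml with hd
  have hnd : d.keys.Nodup := PySem.Dict.nodup_keys_ofList ml
  set skeys := PySem.List.sorted d.keys (fun x => x) false with hsk
  have hperm : skeys.Perm d.keys := PySem.List.sorted_perm d.keys (fun x => x) false
  have hsnd : skeys.Nodup := hperm.symm.nodup hnd
  have hple : skeys.Pairwise (· ≤ ·) := by
    have := PySem.List.sorted_pairwise d.keys (fun x => x)
    simpa using this
  have hplt : skeys.Pairwise (· < ·) := by
    have := hple.and hsnd
    exact this.imp (fun ⟨h1, h2⟩ => lt_of_le_of_ne h1 h2)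
  have hcont : ∀ k ∈ skeys, d.contains k = true := by
    intro k hk
    exact (PySem.Dict.contains_iff_mem_keys d k).mpr ((PySem.List.mem_sorted _ _ _ _).mp hk)
  rw [findA_loop_eq measure d skeys none hplt hcont]
  show (match (skeys.filter (fun k => decide (k ≤ measure))).max? with
        | none => (none : Option Int)
        | some k => d.get? k) =
       (match PySem.List.max? (d.keys.filter (fun k => decide (k ≤ measure))) (fun x => x) with
        | none => none
        | some k => d.get? k)
  rw [pyMax_eq_max?, max?_perm (hperm.filter _)]
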